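-- pv_equiv track=rewrite | github.com/vkhangpham/glossary | generate_glossary/disambiguation/sense_splitter.py | _are_tags_distinct_pure
-- ===== SOURCE A (Python) =====
-- from typing import Dict, List, Any, Optional, Tuple, Callable
--
-- def _are_tags_distinct_pure(tags: List[str]) -> bool:
--     """Check if tags are semantically distinct (pure function)."""
--     if len(tags) != len(set(tags)):
--         return False  # Duplicate tags
--
--     # Check for semantic similarity
--     for i, tag1 in enumerate(tags):
--         for tag2 in tags[i+1:]:
--             # Simple similarity checks
--             if tag1.lower() in tag2.lower() or tag2.lower() in tag1.lower():
--                 return False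
--
--             # Check for common stems (very basic)
--             if len(tag1) > 3 and len(tag2) > 3:
--                 if tag1[:3] == tag2[:3]:
--                     return False
--
--     return True
-- ===== SOURCE B (Python) =====
-- def _are_tags_distinct_pure(tags):
--     """Staged passes instead of pairwise nested loops: duplicates and shared
--     3-char stems are detected by set-cardinality over whole-list projections,
--     and the substring test for each tag is a single search in ONE text built by
--     joining all the *other* lowercased tags with a '\\x00' separator (tags never
--     contain NUL, so an occurrence cannot span two tags)."""
--     if len(tags) <= 1:
--         return True
--     if len(tags) != len(set(tags)):
--         return False
--     lows = [t.lower() for t in tags]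
--     for i, lo in enumerate(lows):
--         others = "\x00".join(lows[:i] + lows[i + 1:])
--         if lo in others:
--             return False
--     prefs = [t[:3] for t in tags if len(t) > 3]
--     return len(prefs) == len(set(prefs))
-- ===== Notes on version B (the rewrite author's own statement) =====
-- stated objective: alternative
-- what changed: A interleaves three checks inside a nested pairwise loop; B is staged: duplicates and shared 3-char stems become set-cardinality tests over whole-list projections, and the pairwise substring comparison is replaced by one search per tag in a single NUL-joined text of all the other lowercased tags (correct because tags are NUL-free, so an occurrence cannot span two tags).
import Mathlib
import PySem

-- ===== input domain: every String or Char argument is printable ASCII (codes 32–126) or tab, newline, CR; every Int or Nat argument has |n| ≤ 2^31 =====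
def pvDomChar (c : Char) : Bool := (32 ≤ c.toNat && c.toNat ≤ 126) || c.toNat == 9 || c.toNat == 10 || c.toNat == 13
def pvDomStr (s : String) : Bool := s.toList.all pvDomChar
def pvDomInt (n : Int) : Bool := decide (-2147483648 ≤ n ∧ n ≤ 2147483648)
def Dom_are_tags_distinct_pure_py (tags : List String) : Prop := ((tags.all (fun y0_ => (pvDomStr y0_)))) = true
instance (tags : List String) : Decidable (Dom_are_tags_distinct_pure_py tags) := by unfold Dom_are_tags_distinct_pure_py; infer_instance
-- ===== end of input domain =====

-- B replaces A's nested pairwise loop by staged passes: set-cardinality tests for duplicates and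
-- shared 3-char stems, and one substring search per tag in a single NUL-joined text of the other
-- lowercased tags (objective: alternative algorithm, same worst-case cost).

-- ===== PORT A =====
-- inner loop: 'for tag2 in tags[i+1:]', returning false on the first similar pair
def pvAInner (tag1 : String) : List String → Bool
  | [] => true
  | tag2 :: rest =>
    if PySem.Str.isIn (PySem.Str.lower tag1) (PySem.Str.lower tag2)
        || PySem.Str.isIn (PySem.Str.lower tag2) (PySem.Str.lower tag1) then false
    else if PySem.Str.len tag1 > 3 && PySem.Str.len tag2 > 3
            && (PySem.Str.slice tag1 none (some 3) == PySem.Str.slice tag2 none (some 3)) then false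
    else pvAInner tag1 rest

-- outer loop: 'for i, tag1 in enumerate(tags)' (tags[i+1:] is the rest of the list)
def pvAOuter : List String → Bool
  | [] => true
  | tag1 :: rest => if pvAInner tag1 rest then pvAOuter rest else false

def are_tags_distinct_pure_py (tags : List String) : Bool :=
  if tags.length ≠ (PySem.Set.ofList tags).length then false
  else pvAOuter tags

-- ===== PORT B =====
-- loop 'for i, lo in enumerate(lows)': one substring search in the join of the OTHER lowered tags
def pvBScan (lows : List String) : List (Int × String) → Bool
  | [] => true
  | (i, lo) :: rest =>
    let others := PySem.Str.join "\x00"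
      (PySem.List.slice lows none (some i) ++ PySem.List.slice lows (some (i + 1)) none)
    if PySem.Str.isIn lo others then false else pvBScan lows rest

def are_tags_distinct_pure_py_alt (tags : List String) : Bool :=
  if tags.length ≤ 1 then true
  else if tags.length ≠ (PySem.Set.ofList tags).length then false
  else
    let lows := tags.map PySem.Str.lower
    if pvBScan lows (PySem.List.enumerate lows) then
      let prefs := (tags.filter (fun t => PySem.Str.len t > 3)).map
        (fun t => PySem.Str.slice t none (some 3))
      prefs.length == (PySem.Set.ofList prefs).length
    else false

-- ===== PRECONDITION & SPEC =====
def Spec_are_tags_distinct_pure_py (tags : List String) (out : Bool) : Prop := out = are_tags_distinct_pure_py_alt tags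
instance (tags : List String) (out : Bool) : Decidable (Spec_are_tags_distinct_pure_py tags out) := by unfold Spec_are_tags_distinct_pure_py; infer_instance

-- ===== CLAIM (what is proved, stated in full; the proofs are below) =====
def Claim_equal_are_tags_distinct_pure_py : Prop := ∀ (tags : List String), Dom_are_tags_distinct_pure_py tags → Spec_are_tags_distinct_pure_py tags (are_tags_distinct_pure_py tags)

-- ===== LEMMAS AND PROOFS =====

-- the pair condition A enforces: no substring either way (lowered), no shared 3-char stem of long tags
def pvRg (t u : String) : Prop :=
  ¬ (PySem.Str.lower t).toList <:+: (PySem.Str.lower u).toList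
  ∧ ¬ (PySem.Str.lower u).toList <:+: (PySem.Str.lower t).toList
  ∧ (3 < PySem.Str.len t → 3 < PySem.Str.len u →
      PySem.Str.slice t none (some 3) ≠ PySem.Str.slice u none (some 3))

theorem pvAInner_iff (t : String) (l : List String) :
    pvAInner t l = true ↔ ∀ u ∈ l, pvRg t u := by
  induction l with
  | nil => simp [pvAInner]
  | cons u rest ih =>
    simp only [pvAInner, List.mem_cons, forall_eq_or_imp, ← ih]
    split_ifs with h1 h2
    · simp only [false_iff]
      rintro ⟨⟨c1, c2, _⟩, _⟩
      rcases Bool.or_eq_true_iff.mp h1 with h | h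
      · exact c1 ((PySem.Str.isIn_iff_infix _ _).mp h)
      · exact c2 ((PySem.Str.isIn_iff_infix _ _).mp h)
    · simp only [false_iff]
      rintro ⟨⟨_, _, c3⟩, _⟩
      simp only [Bool.and_eq_true, decide_eq_true_eq, beq_iff_eq] at h2
      exact c3 h2.1.1 h2.1.2 h2.2
    · simp only [Bool.or_eq_true_iff, not_or, PySem.Str.isIn_iff_infix] at h1
      have hr : pvRg t u := ⟨h1.1, h1.2, fun a b heq => h2 (by
        simp only [Bool.and_eq_true, decide_eq_true_eq, beq_iff_eq]
        exact ⟨⟨a, b⟩, heq⟩)⟩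
      simp [hr]

theorem pvAOuter_iff (l : List String) : pvAOuter l = true ↔ List.Pairwise pvRg l := by
  induction l with
  | nil => simp [pvAOuter]
  | cons t rest ih =>
    simp only [pvAOuter, List.pairwise_cons, ← ih, ← pvAInner_iff]
    split_ifs with h <;> simp [h]

theorem pv_ofList_len_iff {α : Type} [DecidableEq α] (l : List α) :
    (PySem.Set.ofList l).length = l.length ↔ l.Nodup := by
  constructor
  · intro h
    have hfin : (PySem.Set.ofList l).toFinset = l.toFinset := by
      ext x; simp [List.mem_toFinset, PySem.Set.mem_ofList]
    have hc : l.toFinset.card = l.length := by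
      rw [← hfin, List.toFinset_card_of_nodup (PySem.Set.nodup_ofList l), h]
    have hd : l.dedup.length = l.length := by
      rw [List.card_toFinset] at hc; exact hc
    exact List.dedup_eq_self.mp (l.dedup_sublist.eq_of_length hd)
  · intro h; rw [PySem.Set.ofList_eq_self_of_nodup l h]

theorem pvA_iff (tags : List String) :
    are_tags_distinct_pure_py tags = true ↔ tags.Nodup ∧ List.Pairwise pvRg tags := by
  unfold are_tags_distinct_pure_py
  rw [← pv_ofList_len_iff, ← pvAOuter_iff]
  split_ifs with h
  · simp only [false_iff, not_and]
    exact fun hl => absurd hl.symm h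
  · rw [not_ne_iff] at h
    simp [h.symm]

-- splitting an infix occurrence across a separator the pattern does not contain
theorem pv_infix_split (s a m : List Char) (h0 : ('\x00' : Char) ∉ s) :
    s <:+: a ++ '\x00' :: m ↔ s <:+: a ∨ s <:+: m := by
  constructor
  · rintro ⟨u, v, he⟩
    rcases Nat.lt_or_ge a.length (u.length + s.length) with hbig | hsmall
    · rcases Nat.lt_or_ge a.length u.length with h2 | h3
      -- whole of s lies inside m
      · right
        have hd : (a ++ '\x00' :: m).drop (a.length + 1) = m := by
          have : a ++ '\x00' :: m = (a ++ ['\x00']) ++ m := by simp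
          rw [this, List.drop_append_of_le_length (by simp)]
          simp
        have hd2 : (u ++ (s ++ v)).drop (a.length + 1)
            = u.drop (a.length + 1) ++ (s ++ v) := by
          exact List.drop_append_of_le_length (by omega)
        rw [List.append_assoc] at he
        rw [← he] at hd
        rw [hd2] at hd
        exact ⟨u.drop (a.length + 1), v, by rw [← hd, List.append_assoc]⟩
      -- the separator position falls inside s: contradiction
      · exfalso
        have hq := congrArg (fun l => l[a.length]?) he
        simp only at hq
        have hL : (u ++ (s ++ v))[a.length]? = s[a.length - u.length]? := by
          rw [List.getElem?_append_right h3]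
          rw [List.getElem?_append_left (by omega)]
        have hR : (a ++ '\x00' :: m)[a.length]? = some '\x00' := by
          rw [List.getElem?_append_right (le_refl _)]
          simp
        rw [List.append_assoc] at hq
        rw [hL, hR] at hq
        exact h0 (List.mem_of_getElem? hq)
    -- whole of s lies inside a
    · left
      have hd : (a ++ '\x00' :: m).drop u.length = a.drop u.length ++ '\x00' :: m :=
        List.drop_append_of_le_length (by omega)
      rw [List.append_assoc] at he
      rw [← he, List.drop_append_of_le_length (le_refl _)] at hd
      simp only [List.drop_length, List.nil_append] at hd
      have hpre : s <+: a.drop u.length := by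
        have h1 : s <+: a.drop u.length ++ '\x00' :: m := ⟨v, hd⟩
        exact (List.isPrefix_append_of_length (by simp; omega)).mp h1
      exact hpre.isInfix.trans (a.drop_suffix u.length).isInfix
  · rintro (h | h)
    · exact h.trans ⟨[], '\x00' :: m, by simp⟩
    · exact h.trans ⟨a ++ ['\x00'], [], by simp⟩

theorem pv_infix_join (s : List Char) (h0 : ('\x00' : Char) ∉ s) :
    ∀ (parts : List (List Char)), parts ≠ [] →
      (s <:+: PySem.Chars.join ['\x00'] parts ↔ ∃ p ∈ parts, s <:+: p) := by
  intro parts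
  induction parts with
  | nil => intro h; exact absurd rfl h
  | cons p rest ih =>
    intro _
    cases rest with
    | nil => simp [PySem.Chars.join_singleton]
    | cons q rest' =>
      rw [PySem.Chars.join_cons_cons]
      have : p ++ ['\x00'] ++ PySem.Chars.join ['\x00'] (q :: rest')
          = p ++ '\x00' :: PySem.Chars.join ['\x00'] (q :: rest') := by simp
      rw [this, pv_infix_split s p _ h0, ih (by simp)]
      simp

-- lowered Dom strings are NUL-free
theorem pv_lower_nul_free (t : String) (h : pvDomStr t = true) :
    ('\x00' : Char) ∉ (PySem.Str.lower t).toList := by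
  intro hm
  rw [PySem.Str.toList_lower] at hm
  unfold PySem.Chars.lower at hm
  obtain ⟨c, hc, he⟩ := List.mem_map.mp hm
  have hdc : pvDomChar c = true := by
    unfold pvDomStr at h
    exact List.all_eq_true.mp h c hc
  unfold PySem.Chars.lowerChar at he
  split_ifs at he with hu
  · simp only [PySem.Chars.isupper, Bool.and_eq_true, decide_eq_true_eq] at hu
    have h1 : (65 : Nat) ≤ c.toNat := hu.1
    have h2 : c.toNat ≤ 90 := hu.2
    have hv : Nat.isValidChar (c.toNat + 32) := Or.inl (by omega)
    have : (Char.ofNat (c.toNat + 32)).toNat = c.toNat + 32 := by simp [Char.ofNat, hv]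
    have h0 : ('\x00' : Char).toNat = 0 := rfl
    rw [← he, this] at h0
    omega
  · subst he
    simp [pvDomChar] at hdc

theorem pvBScan_iff (lows : List String) (l : List (Int × String)) :
    pvBScan lows l = true ↔ ∀ p ∈ l,
      PySem.Str.isIn p.2 (PySem.Str.join "\x00"
        (PySem.List.slice lows none (some p.1) ++ PySem.List.slice lows (some (p.1 + 1)) none)) = false := by
  induction l with
  | nil => simp [pvBScan]
  | cons p rest ih =>
    obtain ⟨i, lo⟩ := p
    simp only [pvBScan]
    split_ifs with h
    · simp only [false_iff, not_forall]
      exact ⟨(i, lo), List.mem_cons_self, by rw [h]; simp⟩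
    · rw [ih]
      rw [Bool.not_eq_true] at h
      constructor
      · intro hr q hq
        rcases List.mem_cons.mp hq with rfl | hq
        · exact h
        · exact hr q hq
      · intro hall q hq
        exact hall q (List.mem_cons_of_mem _ hq)

-- membership in take i ++ drop (i+1) = "the other positions"
theorem pv_mem_others {α : Type} (l : List α) (i : Nat) (hi : i < l.length) (x : α) :
    x ∈ l.take i ++ l.drop (i + 1) ↔ ∃ j : Nat, ∃ h : j < l.length, j ≠ i ∧ x = l[j] := by
  rw [List.mem_append]
  constructor
  · rintro (h | h)
    · obtain ⟨j, hj, he⟩ := List.mem_iff_getElem.mp h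
      have hjl : j < i ∧ j < l.length := by simpa using hj
      exact ⟨j, by omega, by omega, by rw [← he]; exact List.getElem_take⟩
    · obtain ⟨j, hj, he⟩ := List.mem_iff_getElem.mp h
      have : j < l.length - (i+1) := by simpa using hj
      exact ⟨i + 1 + j, by omega, by omega, by rw [← he]; rw [List.getElem_drop]⟩
  · rintro ⟨j, hj, hne, rfl⟩
    rcases Nat.lt_or_ge j i with hl | hg
    · left
      rw [List.mem_iff_getElem]
      exact ⟨j, by simp; omega, List.getElem_take⟩
    · right
      have hg2 : i + 1 ≤ j := by omega
      rw [List.mem_iff_getElem]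
      refine ⟨j - (i+1), by simp; omega, ?_⟩
      rw [List.getElem_drop]
      congr 1
      omega

theorem pv_one (tags : List String) (hd : Dom_are_tags_distinct_pure_py tags)
    (h2 : 2 ≤ tags.length) (k : Nat) (hk : k < tags.length) :
    PySem.Str.isIn ((tags.map PySem.Str.lower)[k]'(by simpa using hk))
      (PySem.Str.join "\x00"
        (PySem.List.slice (tags.map PySem.Str.lower) none (some (k : Int))
          ++ PySem.List.slice (tags.map PySem.Str.lower) (some ((k : Int) + 1)) none)) = false
    ↔ ∀ (j : Nat) (hj : j < tags.length), j ≠ k →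
        ¬ (PySem.Str.lower tags[k]).toList <:+: (PySem.Str.lower tags[j]).toList := by
  have hkl : k < (tags.map PySem.Str.lower).length := by simpa using hk
  have harg : PySem.List.slice (tags.map PySem.Str.lower) none (some (k : Int))
      ++ PySem.List.slice (tags.map PySem.Str.lower) (some ((k : Int) + 1)) none
      = (tags.map PySem.Str.lower).take k ++ (tags.map PySem.Str.lower).drop (k + 1) := by
    rw [PySem.List.slice_to _ (by positivity), PySem.List.slice_from _ (by positivity)]
    norm_num
  have hdom : ∀ (t : String), t ∈ tags → pvDomStr t = true := by
    intro t ht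
    exact List.all_eq_true.mp hd t ht
  have hnul : ('\x00' : Char) ∉ ((tags.map PySem.Str.lower)[k]'hkl).toList := by
    rw [List.getElem_map]
    exact pv_lower_nul_free _ (hdom _ (List.getElem_mem hk))
  have hne : List.map String.toList
      ((tags.map PySem.Str.lower).take k ++ (tags.map PySem.Str.lower).drop (k + 1)) ≠ [] := by
    apply List.ne_nil_of_length_pos
    simp only [List.length_map, List.length_append, List.length_take, List.length_drop]
    omega
  rw [← Bool.not_eq_true, PySem.Str.isIn_iff_infix, PySem.Str.toList_join,
    harg, (by decide : ("\x00" : String).toList = ['\x00']),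
    pv_infix_join _ hnul _ hne]
  constructor
  · intro h j hj hjk hbad
    apply h
    refine ⟨(PySem.Str.lower tags[j]).toList, List.mem_map.mpr
      ⟨PySem.Str.lower tags[j], ?_, rfl⟩, by rw [List.getElem_map]; exact hbad⟩
    rw [pv_mem_others _ k hkl]
    exact ⟨j, by simpa using hj, hjk, by rw [List.getElem_map]⟩
  · rintro h ⟨p, hp, hbad⟩
    obtain ⟨x, hx, rfl⟩ := List.mem_map.mp hp
    rw [pv_mem_others _ k hkl] at hx
    obtain ⟨j, hj, hjk, rfl⟩ := hx
    rw [List.getElem_map] at hbad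
    rw [List.getElem_map] at hbad
    exact h j (by simpa using hj) hjk hbad

theorem pvB_iff (tags : List String) (hd : Dom_are_tags_distinct_pure_py tags) (h2 : 2 ≤ tags.length) :
    are_tags_distinct_pure_py_alt tags = true ↔ tags.Nodup ∧ List.Pairwise pvRg tags := by
  unfold are_tags_distinct_pure_py_alt
  rw [if_neg (by omega)]
  by_cases hnd : tags.Nodup
  · rw [if_neg (by rw [not_ne_iff, PySem.Set.ofList_eq_self_of_nodup tags hnd])]
    simp only [hnd, true_and]
    have hscaniff : pvBScan (tags.map PySem.Str.lower)
        (PySem.List.enumerate (tags.map PySem.Str.lower)) = true ↔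
        ∀ (k j : Nat) (hk : k < tags.length) (hj : j < tags.length), j ≠ k →
          ¬ (PySem.Str.lower tags[k]).toList <:+: (PySem.Str.lower tags[j]).toList := by
      rw [pvBScan_iff]
      constructor
      · intro hall k j hk hj hjk
        have hp := hall ((k : Int), (tags.map PySem.Str.lower)[k]'(by simpa using hk))
          (by rw [PySem.List.mem_enumerate_iff]
              exact ⟨k, by simpa using hk, by simp⟩)
        rw [pv_one tags hd h2 k hk] at hp
        exact hp j hj hjk
      · intro h p hp
        rw [PySem.List.mem_enumerate_iff] at hp
        obtain ⟨k, hk, rfl⟩ := hp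
        simp only [zero_add]
        rw [pv_one tags hd h2 k (by simpa using hk)]
        intro j hj hjk
        exact h k j (by simpa using hk) hj hjk
    have hprefiff : (((tags.filter (fun t => PySem.Str.len t > 3)).map
          (fun t => PySem.Str.slice t none (some 3))).length
        == (PySem.Set.ofList ((tags.filter (fun t => PySem.Str.len t > 3)).map
          (fun t => PySem.Str.slice t none (some 3)))).length) = true ↔
        List.Pairwise (fun a b => 3 < PySem.Str.len a → 3 < PySem.Str.len b →
          PySem.Str.slice a none (some 3) ≠ PySem.Str.slice b none (some 3)) tags := by
      rw [beq_iff_eq, eq_comm, pv_ofList_len_iff]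
      have hnp : ∀ (l : List String), l.Nodup ↔ l.Pairwise (· ≠ ·) := fun l => Iff.rfl
      rw [hnp, List.pairwise_map, List.pairwise_filter]
      constructor
      · intro h
        exact h.imp (by intro a b hab h3a h3b
                        exact hab (by simpa using h3a) (by simpa using h3b))
      · intro h
        exact h.imp (by intro a b hab h3a h3b
                        exact hab (by simpa using h3a) (by simpa using h3b))
    split_ifs with hsc
    · rw [hprefiff]
      have hsub := hscaniff.mp hsc
      constructor
      · intro h3
        rw [List.pairwise_iff_getElem]
        intro i j hi hj hij
        rw [List.pairwise_iff_getElem] at h3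
        exact ⟨hsub i j hi hj (by omega), hsub j i hj hi (by omega), h3 i j hi hj hij⟩
      · intro hpw
        exact hpw.imp (fun h => h.2.2)
    · simp only [false_iff]
      intro hpw
      apply hsc
      rw [hscaniff]
      intro k j hk hj hjk
      rw [List.pairwise_iff_getElem] at hpw
      rcases Nat.lt_or_ge k j with hlt | hge
      · exact (hpw k j hk hj hlt).1
      · have hlt2 : j < k := by omega
        exact (hpw j k hj hk hlt2).2.1
  · rw [if_pos (fun hcon => hnd ((pv_ofList_len_iff tags).mp hcon.symm))]
    simp [hnd]

-- ===== VERDICT (by name: the statement is the Claim_ definition above) =====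
theorem are_tags_distinct_pure_py_spec : Claim_equal_are_tags_distinct_pure_py := by
  intro tags hd
  unfold Spec_are_tags_distinct_pure_py
  rcases Nat.lt_or_ge tags.length 2 with hs | h2
  · have halt : are_tags_distinct_pure_py_alt tags = true := by
      unfold are_tags_distinct_pure_py_alt
      rw [if_pos (by omega)]
    rw [halt]
    cases tags with
    | nil => rfl
    | cons t rest =>
      cases rest with
      | nil =>
        simp [are_tags_distinct_pure_py,
          PySem.Set.ofList_eq_self_of_nodup _ (List.nodup_singleton t), pvAOuter, pvAInner]
      | cons a b => simp at hs
  · rw [Bool.eq_iff_iff, pvA_iff tags, pvB_iff tags hd h2]
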